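-- pv_equiv track=rewrite | github.com/Aruljo55/leetcode | minindex.py | minimumIndex
-- ===== SOURCE A (Python) =====
-- def minimumIndex(nums):
--     n = len(nums)
--
--     # Step 1: Find the dominant element
--     dominant = max(set(nums), key=nums.count)
--
--     # Step 2: Compute the prefix and suffix counts of the dominant element
--     prefix_count = [0] * n
--     suffix_count = [0] * n
--
--     # Fill prefix_count
--     prefix_count[0] = 1 if nums[0] == dominant else 0
--     for i in range(1, n):
--         prefix_count[i] = prefix_count[i - 1] + (1 if nums[i] == dominant else 0)
--
--     # Fill suffix_count
--     suffix_count[n - 1] = 1 if nums[n - 1] == dominant else 0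
--     for i in range(n - 2, -1, -1):
--         suffix_count[i] = suffix_count[i + 1] + (1 if nums[i] == dominant else 0)
--
--     # Step 3: Check for valid splits
--     for i in range(n - 1):  # valid splits are at indices i, where 0 <= i < n - 1
--         if prefix_count[i] * 2 > (i + 1) and suffix_count[i + 1] * 2 > (n - i - 1):
--             return i
--
--     return -1  # No valid split found
-- ===== SOURCE B (Python) =====
-- def minimumIndex(nums):
--     n = len(nums)
--     # same dominant selection as A (keeps tie-break / empty-input ValueError)
--     dominant = max(set(nums), key=nums.count)
--     total = nums.count(dominant)
--     prefix = 0
--     for i in range(n - 1):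
--         prefix += 1 if nums[i] == dominant else 0
--         if prefix * 2 > i + 1 and (total - prefix) * 2 > n - i - 1:
--             return i
--     return -1
-- ===== Notes on version B (the rewrite author's own statement) =====
-- stated objective: simpler
-- what changed: B drops both precomputed prefix/suffix count arrays and the separate check loop, keeping only a running prefix count of the dominant element in a single forward pass with O(1) extra state (suffix count derived as total - prefix); the dominant-selection line is kept verbatim so tie-break and empty-input ValueError match.
import Mathlib
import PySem

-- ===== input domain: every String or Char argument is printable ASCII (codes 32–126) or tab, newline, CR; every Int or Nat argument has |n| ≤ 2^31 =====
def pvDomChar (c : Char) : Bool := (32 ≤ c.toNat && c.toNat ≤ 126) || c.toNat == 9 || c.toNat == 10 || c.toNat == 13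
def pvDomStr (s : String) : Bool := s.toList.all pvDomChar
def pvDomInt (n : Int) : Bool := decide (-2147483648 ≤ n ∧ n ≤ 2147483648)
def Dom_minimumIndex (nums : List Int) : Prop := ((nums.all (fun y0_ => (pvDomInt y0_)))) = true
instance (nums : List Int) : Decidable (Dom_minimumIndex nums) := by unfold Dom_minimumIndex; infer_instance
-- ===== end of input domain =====

-- B replaces A's two precomputed prefix/suffix count arrays and separate check loop by one
-- forward pass with a running prefix count (suffix derived as total - prefix); return values
-- proved equal on all nonempty lists (A raises ValueError on []).

-- ===== PORT A =====
-- the `for i in range(n-1): if …: return i` check loop of A (early return)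
def checkA (pc sc : List Int) (n : Int) : List Int → Int
  | [] => -1
  | i :: rest =>
    if PySem.List.pyGetD pc i 0 * 2 > i + 1 ∧ PySem.List.pyGetD sc (i + 1) 0 * 2 > n - i - 1 then i
    else checkA pc sc n rest

def minimumIndex (nums : List Int) : Int :=
  let n : Int := (nums.length : Int)
  -- dominant = max(set(nums), key=nums.count); none = ValueError on empty input (excluded by Pre_).
  -- Python's set-iteration order can differ from first-occurrence order only between count-ties,
  -- which provably cannot change the returned index.
  match PySem.List.max? (PySem.Set.ofList nums) (fun x => (nums.count x : Int)) with
  | none => 0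
  | some dominant =>
    let prefix1 := PySem.List.pySetD (List.replicate n.toNat (0:Int)) 0
        (if PySem.List.pyGetD nums 0 0 = dominant then 1 else 0)
    let prefix_count := (PySem.List.pyRange 1 n 1).foldl (fun pc i =>
        PySem.List.pySetD pc i (PySem.List.pyGetD pc (i - 1) 0 +
          (if PySem.List.pyGetD nums i 0 = dominant then (1:Int) else 0))) prefix1
    let suffix1 := PySem.List.pySetD (List.replicate n.toNat (0:Int)) (n - 1)
        (if PySem.List.pyGetD nums (n - 1) 0 = dominant then 1 else 0)
    let suffix_count := (PySem.List.pyRange (n - 2) (-1) (-1)).foldl (fun sc i =>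
        PySem.List.pySetD sc i (PySem.List.pyGetD sc (i + 1) 0 +
          (if PySem.List.pyGetD nums i 0 = dominant then (1:Int) else 0))) suffix1
    checkA prefix_count suffix_count n (PySem.List.pyRange 0 (n - 1) 1)

-- ===== PORT B =====
-- B's single pass: running prefix count of the dominant element, early return
def loopB (nums : List Int) (dominant total n : Int) : Int → List Int → Int
  | _, [] => -1
  | pfx, i :: rest =>
    let pfx' := pfx + (if PySem.List.pyGetD nums i 0 = dominant then (1:Int) else 0)
    if pfx' * 2 > i + 1 ∧ (total - pfx') * 2 > n - i - 1 then i
    else loopB nums dominant total n pfx' rest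

def minimumIndex_alt (nums : List Int) : Int :=
  let n : Int := (nums.length : Int)
  match PySem.List.max? (PySem.Set.ofList nums) (fun x => (nums.count x : Int)) with
  | none => 0
  | some dominant =>
    let total : Int := (nums.count dominant : Int)
    loopB nums dominant total n 0 (PySem.List.pyRange 0 (n - 1) 1)

-- ===== PRECONDITION & SPEC =====
-- Pre_ excludes only the empty list, on which A raises ValueError (max() of an empty set).
def Pre_minimumIndex (nums : List Int) : Prop := nums ≠ []
instance (nums : List Int) : Decidable (Pre_minimumIndex nums) := by unfold Pre_minimumIndex; infer_instance
def pvWitness_minimumIndex : List Int := [1, 2, 2, 2]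

def Spec_minimumIndex (nums : List Int) (out : Int) : Prop := out = minimumIndex_alt nums
instance (nums : List Int) (out : Int) : Decidable (Spec_minimumIndex nums out) := by unfold Spec_minimumIndex; infer_instance

-- ===== CLAIM (what is proved, stated in full; the proofs are below) =====
def Claim_equal_minimumIndex : Prop := ∀ (nums : List Int), Dom_minimumIndex nums → Pre_minimumIndex nums → Spec_minimumIndex nums (minimumIndex nums)


-- ===== LEMMAS AND PROOFS =====

-- count of d among the first i elements (the value A stores in prefix_count[i-1])
def cntD (nums : List Int) (d : Int) (i : Nat) : Int := ((nums.take i).count d : Int)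
-- count of d from position i on (the value A stores in suffix_count[i])
def sfxD (nums : List Int) (d : Int) (i : Nat) : Int := ((nums.drop i).count d : Int)

lemma cnt_succ (nums : List Int) (d : Int) (j : Nat) (hj : j < nums.length) :
    cntD nums d (j + 1) = cntD nums d j + (if PySem.List.pyGetD nums (j : Int) 0 = d then 1 else 0) := by
  unfold cntD
  rw [List.take_add_one, List.count_append, PySem.List.pyGetD_natCast,
      List.getD_eq_getElem?_getD, List.getElem?_eq_getElem hj]
  by_cases h : nums[j] = d <;> simp [h]

lemma sfx_pred (nums : List Int) (d : Int) (j : Nat) (hj : j < nums.length) :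
    sfxD nums d j = sfxD nums d (j + 1) + (if PySem.List.pyGetD nums (j : Int) 0 = d then 1 else 0) := by
  unfold sfxD
  rw [List.drop_eq_getElem_cons hj, List.count_cons, PySem.List.pyGetD_natCast,
      List.getD_eq_getElem?_getD, List.getElem?_eq_getElem hj]
  by_cases h : nums[j] = d <;> simp [h]

lemma sfx_eq_total_sub (nums : List Int) (d : Int) (m : Nat) :
    sfxD nums d m = (nums.count d : Int) - cntD nums d m := by
  have h : nums.count d = (nums.take m).count d + (nums.drop m).count d := by
    conv_lhs => rw [← List.take_append_drop m nums]
    rw [List.count_append]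
  unfold sfxD cntD
  omega

lemma pyRange_neg_one_append_right (a b : Int) (h : b + 1 ≤ a) :
    PySem.List.pyRange a b (-1) = PySem.List.pyRange a (b + 1) (-1) ++ [b + 1] := by
  rw [PySem.List.pyRange_neg_one_eq_reverse, PySem.List.pyRange_neg_one_eq_reverse,
      PySem.List.pyRange_one_cons (by omega)]
  simp

lemma prefixA_char (nums : List Int) (d : Int) (j : Nat) (h1 : 1 ≤ j) (h2 : j ≤ nums.length) :
    (PySem.List.pyRange 1 (j : Int) 1).foldl (fun pc i =>
        PySem.List.pySetD pc i (PySem.List.pyGetD pc (i - 1) 0 +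
          (if PySem.List.pyGetD nums i 0 = d then (1:Int) else 0)))
      (PySem.List.pySetD (List.replicate nums.length (0:Int)) 0
        (if PySem.List.pyGetD nums 0 0 = d then 1 else 0))
    = (List.range j).map (fun k => cntD nums d (k + 1)) ++ List.replicate (nums.length - j) 0 := by
  induction j with
  | zero => omega
  | succ j ih =>
    rcases Nat.eq_or_lt_of_le h1 with h1' | hj1
    · -- j + 1 = 1, i.e. j = 0
      have hj0 : j = 0 := by omega
      subst hj0
      rw [PySem.List.pyRange_one_eq_nil (by norm_num)]
      obtain ⟨x, xs, rfl⟩ : ∃ x xs, nums = x :: xs := by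
        cases nums with
        | nil => simp at h2
        | cons x xs => exact ⟨x, xs, rfl⟩
      rw [PySem.List.pySetD_of_nonneg _ _ (by norm_num)]
      simp [List.replicate_succ, cntD, List.count_cons]
    · have hj : 1 ≤ j := by omega
      have hjn : j < nums.length := by omega
      have hcast : ((j:Int) + 1) = ((j+1 : Nat) : Int) := by push_cast; ring
      rw [show ((j+1 : Nat) : Int) = (j:Int) + 1 by push_cast; ring,
          PySem.List.pyRange_one_succ_right (by exact_mod_cast hj),
          List.foldl_append, ih hj (by omega)]
      simp only [List.foldl_cons, List.foldl_nil]
      -- step at i = j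
      have hlen : ((List.range j).map (fun k => cntD nums d (k + 1))).length = j := by simp
      have hget : PySem.List.pyGetD ((List.range j).map (fun k => cntD nums d (k + 1)) ++ List.replicate (nums.length - j) 0) ((j:Int) - 1) 0 = cntD nums d j := by
        rw [show ((j:Int) - 1) = ((j - 1 : Nat) : Int) by omega, PySem.List.pyGetD_natCast,
            List.getD_eq_getElem?_getD, List.getElem?_append_left (by simp; omega)]
        simp [List.getElem?_map, List.getElem?_range (show j - 1 < j by omega)]
        congr 1
        omega
      rw [hget]
      have hrep : List.replicate (nums.length - j) (0:Int) = 0 :: List.replicate (nums.length - (j+1)) 0 := by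
        rw [show nums.length - j = (nums.length - (j+1)) + 1 by omega, List.replicate_succ]
      rw [PySem.List.pySetD_natCast, hrep,
          List.set_append_right _ _ (by simp : ((List.range j).map (fun k => cntD nums d (k + 1))).length ≤ j)]
      rw [List.range_succ, List.map_append]
      simp only [hlen, Nat.sub_self, List.set_cons_zero]
      simp [cnt_succ nums d j hjn]

lemma suffixA_char (nums : List Int) (d : Int) (k : Nat) (h1 : 1 ≤ nums.length) (h2 : k ≤ nums.length - 1) :
    (PySem.List.pyRange ((nums.length : Int) - 2) (((nums.length - 1 - k : Nat) : Int) - 1) (-1)).foldl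
        (fun sc i => PySem.List.pySetD sc i (PySem.List.pyGetD sc (i + 1) 0 +
          (if PySem.List.pyGetD nums i 0 = d then (1:Int) else 0)))
      (PySem.List.pySetD (List.replicate nums.length (0:Int)) ((nums.length : Int) - 1)
        (if PySem.List.pyGetD nums ((nums.length : Int) - 1) 0 = d then 1 else 0))
    = List.replicate (nums.length - 1 - k) 0 ++
        (List.range (nums.length - (nums.length - 1 - k))).map (fun m => sfxD nums d (nums.length - 1 - k + m)) := by
  induction k with
  | zero =>
    have hb : ((nums.length - 1 - 0 : Nat) : Int) - 1 = (nums.length : Int) - 2 := by omega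
    rw [hb, PySem.List.pyRange_neg_one_eq_nil (le_refl _), List.foldl_nil,
        show (nums.length : Int) - 1 = ((nums.length - 1 : Nat) : Int) by omega,
        PySem.List.pySetD_natCast]
    have hN : nums.length = (nums.length - 1) + 1 := by omega
    have hrep : List.replicate nums.length (0:Int) = List.replicate (nums.length - 1) 0 ++ [0] := by
      conv_lhs => rw [hN, List.replicate_succ']
    rw [hrep, List.set_append_right _ _ (by simp), List.length_replicate, Nat.sub_self,
        List.set_cons_zero]
    have hone : nums.length - (nums.length - 1 - 0) = 1 := by omega
    rw [hone]
    simp only [Nat.sub_zero, List.range_one, List.map_cons, List.map_nil, Nat.add_zero]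
    have hval : (if PySem.List.pyGetD nums ((nums.length - 1 : Nat) : Int) 0 = d then (1:Int) else 0)
        = sfxD nums d (nums.length - 1) := by
      rw [sfx_pred nums d (nums.length - 1) (by omega)]
      have : sfxD nums d (nums.length - 1 + 1) = 0 := by
        have : nums.length - 1 + 1 = nums.length := by omega
        simp [sfxD, this]
      omega
    rw [hval]
  | succ k ih =>
    have hk : k ≤ nums.length - 1 := by omega
    set N := nums.length with hNdef
    have hj : nums.length - 1 - (k+1) + 1 = nums.length - 1 - k := by omega
    set j := N - 1 - (k+1) with hjdef
    have hjN : j < N := by omega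
    have hjle : (j:Int) ≤ (N:Int) - 2 := by omega
    have hb : ((j:Nat):Int) - 1 + 1 = (j:Int) := by ring
    rw [pyRange_neg_one_append_right _ _ (by omega), hb, List.foldl_append,
        show (j:Int) = ((N - 1 - k : Nat):Int) - 1 by omega, ih hk]
    rw [show ((N - 1 - k : Nat):Int) - 1 = (j:Int) by omega]
    simp only [List.foldl_cons, List.foldl_nil]
    have hlen1 : N - 1 - k = j + 1 := by omega
    rw [hlen1]
    have hget : PySem.List.pyGetD (List.replicate (j+1) (0:Int) ++
        (List.range (N - (j+1))).map (fun m => sfxD nums d (j + 1 + m))) ((j:Int) + 1) 0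
        = sfxD nums d (j + 1) := by
      rw [show (j:Int) + 1 = ((j+1 : Nat):Int) by push_cast; ring, PySem.List.pyGetD_natCast,
          List.getD_eq_getElem?_getD,
          List.getElem?_append_right (by simp)]
      simp only [List.length_replicate, Nat.sub_self]
      rw [List.getElem?_map, List.getElem?_range (by omega : 0 < N - (j+1))]
      simp
    rw [hget, PySem.List.pySetD_natCast]
    have hrep : List.replicate (j+1) (0:Int) = List.replicate j 0 ++ [0] := List.replicate_succ' ..
    rw [hrep, List.append_assoc, List.singleton_append,
        List.set_append_right _ _ (by simp), List.length_replicate, Nat.sub_self,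
        List.set_cons_zero]
    rw [show N - j = (N - (j+1)) + 1 by omega, List.range_succ_eq_map, List.map_cons, List.map_map]
    rw [← sfx_pred nums d j hjN]
    have hmap : List.map ((fun m => sfxD nums d (j + m)) ∘ Nat.succ) (List.range (N - (j+1)))
        = List.map (fun m => sfxD nums d (j + 1 + m)) (List.range (N - (j+1))) := by
      apply List.map_congr_left
      intro a ha
      simp only [Function.comp_apply]
      congr 1
      omega
    rw [hmap]
    simp

lemma scan_eq (nums : List Int) (d : Int) (h1 : 1 ≤ nums.length) (a : Nat) (ha : a ≤ nums.length - 1) :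
    checkA ((List.range nums.length).map (fun k => cntD nums d (k + 1)))
           ((List.range nums.length).map (fun k => sfxD nums d k))
           (nums.length : Int) (PySem.List.pyRange (a : Int) ((nums.length : Int) - 1) 1)
    = loopB nums d (nums.count d) (nums.length : Int) (cntD nums d a)
        (PySem.List.pyRange (a : Int) ((nums.length : Int) - 1) 1) := by
  have H : ∀ (b a : Nat), a ≤ nums.length - 1 → nums.length - 1 - a = b →
      checkA ((List.range nums.length).map (fun k => cntD nums d (k + 1)))
             ((List.range nums.length).map (fun k => sfxD nums d k))
             (nums.length : Int) (PySem.List.pyRange (a : Int) ((nums.length : Int) - 1) 1)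
      = loopB nums d (nums.count d) (nums.length : Int) (cntD nums d a)
          (PySem.List.pyRange (a : Int) ((nums.length : Int) - 1) 1) := by
    intro b
    induction b with
    | zero =>
      intro a ha hb
      rw [PySem.List.pyRange_one_eq_nil (by omega)]
      simp [checkA, loopB]
    | succ b ihb =>
      intro a ha hb
      have halt : (a : Int) < (nums.length : Int) - 1 := by omega
      have haN : a < nums.length := by omega
      have haN1 : a + 1 < nums.length := by omega
      rw [PySem.List.pyRange_one_cons halt]
      simp only [checkA, loopB]
      have hpc : PySem.List.pyGetD ((List.range nums.length).map (fun k => cntD nums d (k + 1))) (a : Int) 0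
          = cntD nums d (a + 1) := by
        rw [PySem.List.pyGetD_natCast, List.getD_eq_getElem?_getD, List.getElem?_map,
            List.getElem?_range haN]
        simp
      have hsc : PySem.List.pyGetD ((List.range nums.length).map (fun k => sfxD nums d k)) ((a : Int) + 1) 0
          = (nums.count d : Int) - cntD nums d (a + 1) := by
        rw [show (a : Int) + 1 = ((a + 1 : Nat) : Int) by push_cast; ring,
            PySem.List.pyGetD_natCast, List.getD_eq_getElem?_getD, List.getElem?_map,
            List.getElem?_range haN1]
        simp [sfx_eq_total_sub]
      rw [hpc, hsc, ← cnt_succ nums d a haN,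
          show (a : Int) + 1 = ((a + 1 : Nat) : Int) by push_cast; ring,
          ihb (a + 1) (by omega) (by omega)]
  exact H _ a ha rfl

-- ===== VERDICT (by name: the statement is the Claim_ definition above) =====
theorem minimumIndex_spec : Claim_equal_minimumIndex := by
  unfold Claim_equal_minimumIndex Spec_minimumIndex Pre_minimumIndex
  intro nums _ hne
  have h1 : 1 ≤ nums.length := List.length_pos_of_ne_nil hne
  unfold minimumIndex minimumIndex_alt
  cases hmax : PySem.List.max? (PySem.Set.ofList nums) (fun x => (nums.count x : Int)) with
  | none => rfl
  | some d =>
    simp only [Int.toNat_natCast]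
    rw [prefixA_char nums d nums.length h1 (le_refl _)]
    have hsfx := suffixA_char nums d (nums.length - 1) h1 (le_refl _)
    simp only [Nat.sub_self, Nat.cast_zero, zero_sub, Nat.sub_zero, List.replicate_zero,
      List.nil_append, zero_add] at hsfx
    rw [hsfx]
    have hscan := scan_eq nums d h1 0 (by omega)
    simp only [Nat.cast_zero] at hscan
    have hc0 : cntD nums d 0 = 0 := by simp [cntD]
    rw [hc0] at hscan
    simpa using hscan
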